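-- pv_equiv track=rewrite | github.com/waasiq/rc5-cryptosystem | web/keysched.py | rc5_key_schedule
-- ===== SOURCE A (Python) =====
-- p = 0xB7E15163  # For 32 bit words
--
-- q = 0x9E3779b9  # For 32 bit words
--
-- def rc5_key_schedule(key, rounds):
--     # Convert the key string to a bytes object
--     key_bytes = key.encode()
--
--     # Sub keyschedule intialization according to the paper
--     S = [0] * 2*(rounds+1)
--     S[0] = p
--     for i in range(1, len(S)):
--         S[i] = S[i-1] + q
--
--     # Mix the key into the key schedule
--     l = len(key_bytes) // 4
--     L = [0] * (l+1)
--     for i in range(l):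
--         L[i] = int.from_bytes(key_bytes[4*i:4*(i+1)], 'little')
--     L[l] = int.from_bytes(key_bytes[4*l:], 'little')
--
--     A = B = i = j = 0
--     v = 3 * max(l, 2*(rounds+1))
--     for k in range(v):
--         A = S[i] = ((S[i] + A + B) & 0xFFFFFFFF)
--         B = L[j] = ((L[j] + A + B) & 0xFFFFFFFF)
--         i = (i+1) % (2*(rounds+1))
--         j = (j+1) % (l+1)
--
--     return S
-- ===== SOURCE B (Python) =====
-- p = 0xB7E15163  # For 32 bit words
--
-- q = 0x9E3779b9  # For 32 bit words
--
-- def _words(bs):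
--     # stream the bytes, packing each run of 4 into a little-endian word;
--     # the trailing (possibly empty) partial word is always appended
--     out = []
--     w = sh = 0
--     for b in bs:
--         w += b << sh
--         sh += 8
--         if sh == 32:
--             out.append(w)
--             w = sh = 0
--     out.append(w)
--     return out
--
-- def rc5_key_schedule(key, rounds):
--     t = 2 * (rounds + 1)
--     # closed form: the unmasked init recurrence S[i] = S[i-1] + q is p + i*q
--     S = [p + i * q for i in range(t)]
--     L = _words(key.encode())
--     A = B = 0
--     for k in range(3 * max(len(L) - 1, t)):
--         A = S[k % t] = (S[k % t] + A + B) & 0xFFFFFFFF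
--         B = L[k % len(L)] = (L[k % len(L)] + A + B) & 0xFFFFFFFF
--     return S
-- ===== Notes on version B (the rewrite author's own statement) =====
-- stated objective: alternative
-- what changed: S is produced by the closed form p+i*q instead of A's sequential recurrence over a preallocated zero list, L by recursive 4-byte chunking of the key bytes (with a hand-rolled little-endian fold) instead of an indexed slicing loop into a zero list, and the mixing loop derives its indices as k % t and k % len(L) instead of maintaining separate wrap-around counters i and j.
import Mathlib
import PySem

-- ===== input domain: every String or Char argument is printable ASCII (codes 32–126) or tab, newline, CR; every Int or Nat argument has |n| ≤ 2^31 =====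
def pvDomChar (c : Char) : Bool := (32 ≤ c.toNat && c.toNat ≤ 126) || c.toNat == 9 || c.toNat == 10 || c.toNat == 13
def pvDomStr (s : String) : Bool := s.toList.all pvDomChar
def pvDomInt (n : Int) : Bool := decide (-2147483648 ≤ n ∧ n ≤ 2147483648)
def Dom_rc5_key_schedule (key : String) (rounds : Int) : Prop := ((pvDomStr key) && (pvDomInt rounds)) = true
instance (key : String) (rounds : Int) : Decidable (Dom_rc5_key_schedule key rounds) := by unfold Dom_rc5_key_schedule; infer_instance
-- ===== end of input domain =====

-- B replaces A's sequential S-recurrence by its closed form p+i*q, builds L by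
-- recursive 4-byte chunking instead of an indexed slicing loop, and indexes the
-- mixing loop by k % t / k % len(L) instead of separate counters (objective: alternative).

-- ===== PORT A =====
def pv_p : Int := 0xB7E15163
def pv_q : Int := 0x9E3779B9

-- key.encode(): Dom guarantees ASCII, so the bytes are the code points
def pvBytes (key : String) : List Int := key.toList.map (fun c => (c.toNat : Int))

-- int.from_bytes(bs, 'little')
def pvFromLE (bs : List Int) : Int := bs.foldr (fun b acc => b + 256 * acc) 0

-- one iteration of A's mixing loop (state S, L, A, B, i, j)
def pvStepA (t m : Int) (st : List Int × List Int × Int × Int × Int × Int) (_k : Int) :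
    List Int × List Int × Int × Int × Int × Int :=
  let (S, L, A, B, i, j) := st
  let A' := PySem.Int.band (PySem.List.pyGetD S i 0 + A + B) 0xFFFFFFFF
  let S' := PySem.List.pySetD S i A'
  let B' := PySem.Int.band (PySem.List.pyGetD L j 0 + A' + B) 0xFFFFFFFF
  let L' := PySem.List.pySetD L j B'
  (S', L', A', B', PySem.Int.mod (i + 1) t, PySem.Int.mod (j + 1) m)

def rc5_key_schedule (key : String) (rounds : Int) : List Int :=
  let key_bytes := pvBytes key
  let S0 := PySem.List.pyRepeat (PySem.List.pyRepeat [(0 : Int)] 2) (rounds + 1)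
  let S1 := PySem.List.pySetD S0 0 pv_p
  let S2 := (PySem.List.pyRange 1 (S1.length : Int) 1).foldl
      (fun S i => PySem.List.pySetD S i (PySem.List.pyGetD S (i - 1) 0 + pv_q)) S1
  let l := PySem.Int.floordiv (key_bytes.length : Int) 4
  let L0 := PySem.List.pyRepeat [(0 : Int)] (l + 1)
  let L1 := (PySem.List.pyRange 0 l 1).foldl
      (fun L i => PySem.List.pySetD L i
        (pvFromLE (PySem.List.slice key_bytes (some (4 * i)) (some (4 * (i + 1)))))) L0
  let L2 := PySem.List.pySetD L1 l (pvFromLE (PySem.List.slice key_bytes (some (4 * l)) none))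
  let v := 3 * max l (2 * (rounds + 1))
  ((PySem.List.pyRange 0 v 1).foldl (pvStepA (2 * (rounds + 1)) (l + 1)) (S2, L2, 0, 0, 0, 0)).1

-- ===== PORT B =====
-- one iteration of _words' streaming loop (state out, w, sh; sh is 0/8/16/24, a Nat shift count)
def pvStepW (st : List Int × Int × Nat) (b : Int) : List Int × Int × Nat :=
  let (out, w, sh) := st
  let w' := w + (b <<< sh)
  let sh' := sh + 8
  if sh' == 32 then (out ++ [w'], 0, 0) else (out, w', sh')

def pvWords (bs : List Int) : List Int :=
  let r := bs.foldl pvStepW ([], 0, 0)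
  r.1 ++ [r.2.1]

-- one iteration of B's mixing loop (state S, L, A, B)
def pvStepB (t : Int) (st : List Int × List Int × Int × Int) (k : Int) :
    List Int × List Int × Int × Int :=
  let (S, L, A, B) := st
  let i := PySem.Int.mod k t
  let A' := PySem.Int.band (PySem.List.pyGetD S i 0 + A + B) 0xFFFFFFFF
  let S' := PySem.List.pySetD S i A'
  let j := PySem.Int.mod k (L.length : Int)
  let B' := PySem.Int.band (PySem.List.pyGetD L j 0 + A' + B) 0xFFFFFFFF
  (S', PySem.List.pySetD L j B', A', B')

def rc5_key_schedule_alt (key : String) (rounds : Int) : List Int :=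
  let t := 2 * (rounds + 1)
  let S := (PySem.List.pyRange 0 t 1).map (fun i => pv_p + i * pv_q)
  let L := pvWords (pvBytes key)
  ((PySem.List.pyRange 0 (3 * max ((L.length : Int) - 1) t) 1).foldl (pvStepB t) (S, L, 0, 0)).1

-- ===== PRECONDITION & SPEC =====
-- Pre_ excludes rounds < 0, where A's S is empty and S[0] = p raises IndexError.
def Pre_rc5_key_schedule (key : String) (rounds : Int) : Prop := 0 ≤ rounds
instance (key : String) (rounds : Int) : Decidable (Pre_rc5_key_schedule key rounds) := by
  unfold Pre_rc5_key_schedule; infer_instance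

def pvWitness_rc5_key_schedule : String × Int := ("ab", 1)

def Spec_rc5_key_schedule (key : String) (rounds : Int) (out : List Int) : Prop :=
  out = rc5_key_schedule_alt key rounds
instance (key : String) (rounds : Int) (out : List Int) : Decidable (Spec_rc5_key_schedule key rounds out) := by
  unfold Spec_rc5_key_schedule; infer_instance

-- ===== CLAIM (what is proved, stated in full; the proofs are below) =====
def Claim_equal_rc5_key_schedule : Prop := ∀ (key : String) (rounds : Int),
  Dom_rc5_key_schedule key rounds → Pre_rc5_key_schedule key rounds →
  Spec_rc5_key_schedule key rounds (rc5_key_schedule key rounds)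

-- ===== LEMMAS AND PROOFS =====

-- set at the boundary between the filled prefix and the zero suffix
lemma pvSetAt (l1 l2 : List Int) (x v : Int) (n : Nat) (h : n = l1.length) :
    (l1 ++ x :: l2).set n v = l1 ++ v :: l2 := by subst h; simp

-- A's S-initialization loop computes the closed form
lemma sInit (d : Nat) : ∀ (m T : Nat), T = m + d → 1 ≤ m →
    (PySem.List.pyRange (m : Int) (T : Int) 1).foldl
      (fun S i => PySem.List.pySetD S i (PySem.List.pyGetD S (i - 1) 0 + pv_q))
      ((List.range m).map (fun k : Nat => pv_p + (k : Int) * pv_q) ++ List.replicate (T - m) 0)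
    = (List.range T).map (fun k : Nat => pv_p + (k : Int) * pv_q) := by
  induction d with
  | zero =>
    intro m T hT hm
    subst hT
    rw [PySem.List.pyRange_one_eq_nil (by omega)]
    simp
  | succ d ih =>
    intro m T hT hm
    have hmT : m < T := by omega
    rw [PySem.List.pyRange_one_cons (by exact_mod_cast hmT)]
    rw [List.foldl_cons]
    have hstep : PySem.List.pySetD
        ((List.range m).map (fun k : Nat => pv_p + (k : Int) * pv_q) ++ List.replicate (T - m) 0)
        (m : Int)
        (PySem.List.pyGetD
          ((List.range m).map (fun k : Nat => pv_p + (k : Int) * pv_q) ++ List.replicate (T - m) 0)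
          ((m : Int) - 1) 0 + pv_q)
        = (List.range (m + 1)).map (fun k : Nat => pv_p + (k : Int) * pv_q) ++ List.replicate (T - (m + 1)) 0 := by
      rw [show ((m : Int) - 1) = (((m - 1 : Nat)) : Int) by omega]
      rw [PySem.List.pyGetD_natCast, PySem.List.pySetD_natCast]
      rw [List.getD_append _ _ _ _ (by simp; omega)]
      have hget : ((List.range m).map (fun k : Nat => pv_p + (k : Int) * pv_q)).getD (m - 1) 0
          = pv_p + ((m - 1 : Nat) : Int) * pv_q := by
        rw [List.getD_eq_getElem _ _ (by simp; omega), List.getElem_map, List.getElem_range]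
      have hval : pv_p + ((m - 1 : Nat) : Int) * pv_q + pv_q = pv_p + (m : Int) * pv_q := by
        have h1 : ((m - 1 : Nat) : Int) = (m : Int) - 1 := by omega
        rw [h1]; ring
      rw [hget, hval]
      rw [show T - m = (T - (m + 1)) + 1 by omega, List.replicate_succ,
          pvSetAt _ _ _ _ _ (by simp), List.range_succ, List.map_append]
      simp
    rw [hstep]
    have := ih (m + 1) T (by omega) (by omega)
    rw [show ((m : Int) + 1) = (((m + 1 : Nat)) : Int) by push_cast; ring] at *
    exact this

-- A's L loop fills the words of the full 4-byte chunks
lemma lInit (kb : List Int) (d : Nat) : ∀ (m l : Nat), l = m + d →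
    (PySem.List.pyRange (m : Int) (l : Int) 1).foldl
      (fun L i => PySem.List.pySetD L i
        (pvFromLE (PySem.List.slice kb (some (4 * i)) (some (4 * (i + 1))))))
      ((List.range m).map (fun i => pvFromLE ((kb.drop (4 * i)).take 4)) ++ List.replicate (l + 1 - m) 0)
    = (List.range l).map (fun i => pvFromLE ((kb.drop (4 * i)).take 4)) ++ [0] := by
  induction d with
  | zero =>
    intro m l hl
    subst hl
    rw [PySem.List.pyRange_one_eq_nil (by omega)]
    simp [List.replicate_one]
  | succ d ih =>
    intro m l hl
    have hml : m < l := by omega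
    rw [PySem.List.pyRange_one_cons (by exact_mod_cast hml)]
    rw [List.foldl_cons]
    have hslice : PySem.List.slice kb (some ((4:Int) * (m : Int))) (some ((4:Int) * ((m : Int) + 1)))
        = (kb.drop (4 * m)).take 4 := by
      rw [show (4:Int) * (m : Int) = ((4 * m : Nat) : Int) by push_cast; ring,
          show (4:Int) * (((m : Nat) : Int) + 1) = ((4 * m + 4 : Nat) : Int) by push_cast; ring]
      rw [PySem.List.slice_natCast]
      simp
    have hstep : PySem.List.pySetD
        ((List.range m).map (fun i => pvFromLE ((kb.drop (4 * i)).take 4)) ++ List.replicate (l + 1 - m) 0)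
        (m : Int)
        (pvFromLE (PySem.List.slice kb (some (4 * (m : Int))) (some (4 * ((m : Int) + 1)))))
        = (List.range (m + 1)).map (fun i => pvFromLE ((kb.drop (4 * i)).take 4))
            ++ List.replicate (l + 1 - (m + 1)) 0 := by
      rw [hslice, PySem.List.pySetD_natCast]
      rw [show l + 1 - m = (l + 1 - (m + 1)) + 1 by omega, List.replicate_succ,
          pvSetAt _ _ _ _ _ (by simp), List.range_succ, List.map_append]
      simp
    rw [hstep]
    have := ih (m + 1) l (by omega)
    rw [show ((m : Int) + 1) = (((m + 1 : Nat)) : Int) by push_cast; ring] at *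
    exact this

-- B's streaming word packer equals the indexed chunk words plus the trailing partial word
lemma words_fold (n : Nat) : ∀ (bs : List Int), bs.length ≤ n → ∀ out : List Int,
    (bs.foldl pvStepW (out, 0, 0)).1 ++ [(bs.foldl pvStepW (out, 0, 0)).2.1]
      = out ++ ((List.range (bs.length / 4)).map (fun i => pvFromLE ((bs.drop (4 * i)).take 4))
          ++ [pvFromLE (bs.drop (4 * (bs.length / 4)))]) := by
  induction n with
  | zero =>
    intro bs h out
    have hnil : bs = [] := List.eq_nil_of_length_eq_zero (by omega)
    subst hnil
    simp [pvFromLE]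
  | succ n ih =>
    intro bs h out
    match bs with
    | [] => simp [pvFromLE]
    | [b0] => simp [pvStepW, pvFromLE, Int.shiftLeft_eq]
    | [b0, b1] => simp [pvStepW, pvFromLE, Int.shiftLeft_eq]; ring
    | [b0, b1, b2] => simp [pvStepW, pvFromLE, Int.shiftLeft_eq]; ring
    | b0 :: b1 :: b2 :: b3 :: rest =>
      have hlen : (b0 :: b1 :: b2 :: b3 :: rest).length = rest.length + 4 := by simp
      simp only [List.foldl_cons]
      rw [show pvStepW (pvStepW (pvStepW (pvStepW (out, 0, 0) b0) b1) b2) b3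
            = (out ++ [b0 + b1 * 2 ^ 8 + b2 * 2 ^ 16 + b3 * 2 ^ 24], 0, 0) from by
        simp [pvStepW, Int.shiftLeft_eq]; try ring_nf]
      rw [ih rest (by simp at h; omega) (out ++ [b0 + b1 * 2 ^ 8 + b2 * 2 ^ 16 + b3 * 2 ^ 24])]
      have hl : (b0 :: b1 :: b2 :: b3 :: rest).length / 4 = rest.length / 4 + 1 := by
        rw [hlen]; omega
      rw [hl, List.range_succ_eq_map]
      simp only [List.map_cons, List.map_map]
      have hhead : pvFromLE (List.take 4 (List.drop (4 * 0) (b0 :: b1 :: b2 :: b3 :: rest)))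
          = b0 + b1 * 2 ^ 8 + b2 * 2 ^ 16 + b3 * 2 ^ 24 := by
        simp [pvFromLE]; try ring
      have htail : List.map
            ((fun i => pvFromLE (List.take 4 (List.drop (4 * i) (b0 :: b1 :: b2 :: b3 :: rest)))) ∘ Nat.succ)
            (List.range (rest.length / 4))
          = List.map (fun i => pvFromLE (List.take 4 (List.drop (4 * i) rest)))
            (List.range (rest.length / 4)) := by
        apply List.map_congr_left
        intro i _
        simp only [Function.comp_apply, Nat.succ_eq_add_one]
        rw [show 4 * (i + 1) = 4 * i + 1 + 1 + 1 + 1 from by ring]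
        simp only [List.drop_succ_cons]
      have hlast : List.drop (4 * (rest.length / 4 + 1)) (b0 :: b1 :: b2 :: b3 :: rest)
          = List.drop (4 * (rest.length / 4)) rest := by
        rw [show 4 * (rest.length / 4 + 1) = 4 * (rest.length / 4) + 1 + 1 + 1 + 1 from by ring]
        simp only [List.drop_succ_cons]
      rw [hhead, htail, hlast]
      simp

lemma words_eq (bs : List Int) :
    pvWords bs = (List.range (bs.length / 4)).map (fun i => pvFromLE ((bs.drop (4 * i)).take 4))
      ++ [pvFromLE (bs.drop (4 * (bs.length / 4)))] := by
  unfold pvWords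
  have := words_fold bs.length bs le_rfl []
  simpa using this

lemma words_length (bs : List Int) : (pvWords bs).length = bs.length / 4 + 1 := by
  rw [words_eq]; simp

-- the two mixing loops agree: A's counters i, j stay equal to k % t, k % m
lemma mix (t m : Int) (ht : 0 < t) (hm : 0 < m) (n : Nat) :
    ∀ (k0 : Int) (S L : List Int) (A B : Int), L.length = m.toNat →
    (PySem.List.pyRange k0 (k0 + n) 1).foldl (pvStepA t m)
        (S, L, A, B, PySem.Int.mod k0 t, PySem.Int.mod k0 m)
    = (((PySem.List.pyRange k0 (k0 + n) 1).foldl (pvStepB t) (S, L, A, B)).1,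
       ((PySem.List.pyRange k0 (k0 + n) 1).foldl (pvStepB t) (S, L, A, B)).2.1,
       ((PySem.List.pyRange k0 (k0 + n) 1).foldl (pvStepB t) (S, L, A, B)).2.2.1,
       ((PySem.List.pyRange k0 (k0 + n) 1).foldl (pvStepB t) (S, L, A, B)).2.2.2,
       PySem.Int.mod (k0 + n) t, PySem.Int.mod (k0 + n) m) := by
  induction n with
  | zero =>
    intro k0 S L A B hL
    rw [show k0 + ((0 : Nat) : Int) = k0 by simp]
    rw [PySem.List.pyRange_one_eq_nil le_rfl]
    simp
  | succ n ih =>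
    intro k0 S L A B hL
    have hm' : ((L.length : Nat) : Int) = m := by
      rw [hL]; exact_mod_cast Int.toNat_of_nonneg hm.le
    rw [show k0 + ((n + 1 : Nat) : Int) = (k0 + 1) + (n : Int) by push_cast; ring]
    rw [PySem.List.pyRange_one_cons (by omega)]
    simp only [List.foldl_cons]
    simp only [pvStepA, pvStepB]
    rw [hm']
    have hmt : PySem.Int.mod (PySem.Int.mod k0 t + 1) t = PySem.Int.mod (k0 + 1) t := by
      rw [PySem.Int.mod_eq_emod_of_pos ht, PySem.Int.mod_eq_emod_of_pos ht,
          PySem.Int.mod_eq_emod_of_pos ht, Int.emod_add_emod]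
    have hmm : PySem.Int.mod (PySem.Int.mod k0 m + 1) m = PySem.Int.mod (k0 + 1) m := by
      rw [PySem.Int.mod_eq_emod_of_pos hm, PySem.Int.mod_eq_emod_of_pos hm,
          PySem.Int.mod_eq_emod_of_pos hm, Int.emod_add_emod]
    rw [hmt, hmm]
    rw [ih (k0 + 1) _ _ _ _ (by rw [PySem.List.length_pySetD]; exact hL)]

-- ===== VERDICT (by name: the statement is the Claim_ definition above) =====
theorem rc5_key_schedule_spec : Claim_equal_rc5_key_schedule := by
  intro key rounds _ hpre
  unfold Pre_rc5_key_schedule at hpre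
  unfold Spec_rc5_key_schedule rc5_key_schedule rc5_key_schedule_alt
  simp only []
  set kb := pvBytes key with hkb
  set T : Nat := (2 * (rounds + 1)).toNat with hTdef
  have hTI : ((T : Nat) : Int) = 2 * (rounds + 1) := by omega
  have hT2 : 2 ≤ T := by omega
  set l : Nat := kb.length / 4 with hldef
  have hflo : PySem.Int.floordiv ((kb.length : Nat) : Int) 4 = ((l : Nat) : Int) := by
    exact_mod_cast PySem.Int.floordiv_natCast kb.length 4
  rw [hflo]
  have ht : (0:Int) < 2 * (rounds + 1) := by omega
  have eflat : ∀ n : Nat, (List.replicate n ([0, 0] : List Int)).flatten = List.replicate (n * 2) 0 := by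
    intro n
    induction n with
    | zero => rfl
    | succ n ih => simp [List.replicate_succ, ih, Nat.succ_mul]
  have e0 : PySem.List.pyRepeat (PySem.List.pyRepeat [(0:Int)] 2) (rounds + 1) = List.replicate T 0 := by
    rw [show PySem.List.pyRepeat [(0:Int)] 2 = ([0, 0] : List Int) from by decide]
    simp only [PySem.List.pyRepeat]
    rw [eflat, show (rounds + 1).toNat * 2 = T from by omega]
  rw [e0]
  have e1len : (PySem.List.pySetD (List.replicate T (0:Int)) 0 pv_p).length = T := by
    rw [PySem.List.length_pySetD]; simp
  rw [e1len]
  have e1 : PySem.List.pySetD (List.replicate T (0:Int)) 0 pv_p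
      = (List.range 1).map (fun k : Nat => pv_p + (k : Int) * pv_q) ++ List.replicate (T - 1) 0 := by
    rw [PySem.List.pySetD_of_nonneg _ pv_p le_rfl]
    rw [show T = (T - 1) + 1 from by omega, List.replicate_succ]
    simp
  have e2 : (PySem.List.pyRange 1 ((T : Nat) : Int) 1).foldl
      (fun S i => PySem.List.pySetD S i (PySem.List.pyGetD S (i - 1) 0 + pv_q))
      (PySem.List.pySetD (List.replicate T (0:Int)) 0 pv_p)
      = (List.range T).map (fun k : Nat => pv_p + (k : Int) * pv_q) := by
    rw [e1]
    have := sInit (T - 1) 1 T (by omega) le_rfl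
    rw [show ((1 : Nat) : Int) = (1 : Int) from by norm_num] at this
    exact this
  rw [e2]
  have e3 : (PySem.List.pyRange 0 (2 * (rounds + 1)) 1).map (fun i => pv_p + i * pv_q)
      = (List.range T).map (fun k : Nat => pv_p + (k : Int) * pv_q) := by
    rw [PySem.List.pyRange_one, List.map_map]
    rw [show (2 * (rounds + 1) - 0).toNat = T from by omega]
    apply List.map_congr_left; intro k _; simp
  rw [e3]
  have e4 : PySem.List.pyRepeat [(0:Int)] (((l : Nat) : Int) + 1) = List.replicate (l + 1) 0 := by
    rw [PySem.List.pyRepeat_singleton, show ((((l : Nat) : Int) + 1).toNat) = l + 1 from by omega]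
  rw [e4]
  have e5 : (PySem.List.pyRange 0 ((l : Nat) : Int) 1).foldl
      (fun L i => PySem.List.pySetD L i
        (pvFromLE (PySem.List.slice kb (some (4 * i)) (some (4 * (i + 1)))))) (List.replicate (l + 1) 0)
      = (List.range l).map (fun i => pvFromLE ((kb.drop (4 * i)).take 4)) ++ [0] := by
    have := lInit kb l 0 l (by omega)
    simp only [List.range_zero, List.map_nil, List.nil_append, Nat.sub_zero, Nat.cast_zero] at this
    exact this
  rw [e5]
  have e6 : PySem.List.pySetD
      ((List.range l).map (fun i => pvFromLE ((kb.drop (4 * i)).take 4)) ++ [0]) ((l : Nat) : Int)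
      (pvFromLE (PySem.List.slice kb (some (4 * ((l : Nat) : Int))) none))
      = pvWords kb := by
    rw [show (4:Int) * ((l : Nat) : Int) = ((4 * l : Nat) : Int) from by push_cast; ring,
        PySem.List.slice_from_natCast, PySem.List.pySetD_natCast,
        pvSetAt _ _ _ _ _ (by simp), words_eq, ← hldef]
  rw [e6]
  have e7 : ((pvWords kb).length : Int) - 1 = ((l : Nat) : Int) := by
    rw [words_length, ← hldef]; push_cast; ring
  rw [e7]
  have hm : (0:Int) < ((l : Nat) : Int) + 1 := by omega
  have hlen : (pvWords kb).length = (((l : Nat) : Int) + 1).toNat := by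
    rw [words_length, ← hldef]; omega
  set v : Int := 3 * max ((l : Nat) : Int) (2 * (rounds + 1)) with hvdef
  have hv0 : (0:Int) ≤ v := by
    have hx : (0:Int) ≤ max ((l : Nat) : Int) (2 * (rounds + 1)) :=
      le_trans (Int.natCast_nonneg l) (le_max_left _ _)
    omega
  rw [show PySem.List.pyRange 0 v 1 = PySem.List.pyRange 0 (0 + ((v.toNat : Nat) : Int)) 1 from by
    congr 1; omega]
  have hmix := mix (2 * (rounds + 1)) (((l : Nat) : Int) + 1) ht hm v.toNat 0
    ((List.range T).map (fun k : Nat => pv_p + (k : Int) * pv_q)) (pvWords kb) 0 0 hlen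
  have hz1 : PySem.Int.mod 0 (2 * (rounds + 1)) = 0 := by
    rw [PySem.Int.mod_eq_emod_of_pos ht]; simp
  have hz2 : PySem.Int.mod 0 (((l : Nat) : Int) + 1) = 0 := by
    rw [PySem.Int.mod_eq_emod_of_pos hm]; simp
  rw [hz1, hz2] at hmix
  rw [hmix]
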